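-- pv_equiv track=rewrite | github.com/pypi-data/pypi-mirror-89 | packages/saplings/saplings-4.0.0.tar.gz/saplings-4.0.0/saplings/test_input.py | construct_query
-- ===== SOURCE A (Python) =====
-- def construct_query(keywords, num_keywords=None):
--     keywords = keywords if not num_keywords else keywords[:num_keywords]
--     query, num_words = "", 0
--     for keyword in keywords:
--         if len(query + keyword + " ") >= 300:
--             break
--
--         query += keyword + " "
--         num_words += 1
--
--     # IDEA: This might be useful for creating better queries:
--     # https://en.wikipedia.org/wiki/Help:Searching#Search_string_syntax
--
--     return query[:-1]
-- ===== SOURCE B (Python) =====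
-- def construct_query(keywords, num_keywords=None):
--     kws = keywords if not num_keywords else keywords[:num_keywords]
--     # Staged passes: build the running prefix sums of len(k) + 1 (keyword plus
--     # one space).  Each step adds at least 1, so the totals are strictly
--     # increasing, and the number of totals below 300 is exactly the length of
--     # the prefix of keywords that fits; space-join that prefix.
--     totals, t = [], 0
--     for k in kws:
--         t += len(k) + 1
--         totals.append(t)
--     n = sum(1 for t in totals if t < 300)
--     return " ".join(kws[:n])
-- ===== Notes on version B (the rewrite author's own statement) =====
-- stated objective: alternative
-- what changed: B replaces A's incremental string concatenation with early break and trailing-space trim (query[:-1]) by staged passes: it builds the prefix sums of len(k)+1, counts how many (strictly increasing) totals stay below 300, and space-joins that prefix of keywords.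
import Mathlib
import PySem

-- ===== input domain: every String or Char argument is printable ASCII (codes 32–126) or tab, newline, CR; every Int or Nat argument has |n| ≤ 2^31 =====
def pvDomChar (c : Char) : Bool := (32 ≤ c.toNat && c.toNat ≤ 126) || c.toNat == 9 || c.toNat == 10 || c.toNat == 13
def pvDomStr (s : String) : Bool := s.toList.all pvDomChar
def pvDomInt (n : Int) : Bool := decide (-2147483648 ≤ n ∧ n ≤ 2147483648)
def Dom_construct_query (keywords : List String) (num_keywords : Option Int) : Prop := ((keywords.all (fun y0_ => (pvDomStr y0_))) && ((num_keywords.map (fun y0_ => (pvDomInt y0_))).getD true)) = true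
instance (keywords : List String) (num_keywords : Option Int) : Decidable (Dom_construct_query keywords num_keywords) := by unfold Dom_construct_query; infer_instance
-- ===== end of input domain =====

-- B replaces A's incremental concatenation with early break and trailing-space trim by
-- staged passes: prefix sums of len(k)+1, a count of the totals below 300, and a space-join
-- of that prefix; alternative decomposition, not faster.

-- ===== PORT A =====
-- the for-loop with break: query grows by keyword + " "; num_words is carried as in A (unused by the result)
def cqA_loop : List String → List Char → Int → List Char
  | [], query, _ => query
  | keyword :: rest, query, num_words =>
    if (query ++ keyword.toList ++ [' ']).length ≥ 300 then query
    else cqA_loop rest (query ++ keyword.toList ++ [' ']) (num_words + 1)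

def construct_query (keywords : List String) (num_keywords : Option Int) : String :=
  let kws := match num_keywords with
    | none => keywords
    | some n => if n = 0 then keywords else PySem.List.slice keywords none (some n)
  String.ofList (PySem.Chars.slice (cqA_loop kws [] 0) none (some (-1)))

-- ===== PORT B =====
-- Source B's first pass: the list of running prefix sums of len(k)+1, carrying the total t
def cqB_totals : List String → Int → List Int
  | [], _ => []
  | k :: rest, t => (t + PySem.Str.len k + 1) :: cqB_totals rest (t + PySem.Str.len k + 1)

def construct_query_alt (keywords : List String) (num_keywords : Option Int) : String :=
  let kws := match num_keywords with
    | none => keywords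
    | some n => if n = 0 then keywords else PySem.List.slice keywords none (some n)
  let totals := cqB_totals kws 0
  let n : Nat := totals.countP (fun t => t < 300)
  PySem.Str.join " " (PySem.List.slice kws none (some (n : Int)))

-- ===== PRECONDITION & SPEC =====
def Spec_construct_query (keywords : List String) (num_keywords : Option Int) (out : String) : Prop := out = construct_query_alt keywords num_keywords
instance (keywords : List String) (num_keywords : Option Int) (out : String) : Decidable (Spec_construct_query keywords num_keywords out) := by unfold Spec_construct_query; infer_instance

-- ===== CLAIM (what is proved, stated in full; the proofs are below) =====
def Claim_equal_construct_query : Prop := ∀ (keywords : List String) (num_keywords : Option Int), Dom_construct_query keywords num_keywords → Spec_construct_query keywords num_keywords (construct_query keywords num_keywords)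

-- ===== LEMMAS AND PROOFS =====

-- the keyword-plus-space concatenation of a list of keywords
def cqCat (l : List String) : List Char := (l.map (fun k => k.toList ++ [' '])).flatten

-- every prefix sum exceeds its starting total
theorem cqB_totals_gt (l : List String) (t : Int) : ∀ x ∈ cqB_totals l t, t < x := by
  induction l generalizing t with
  | nil => simp [cqB_totals]
  | cons k rest ih =>
    intro x hx
    rw [cqB_totals] at hx
    have hk : (0:Int) ≤ PySem.Str.len k := by
      simp [PySem.Str.len]
    rcases List.mem_cons.mp hx with h | h
    · omega
    · have := ih (t + PySem.Str.len k + 1) x h; omega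

-- A's loop result is the concatenation of the prefix of keywords whose totals stay below 300
theorem cqA_loop_eq (l : List String) (q : List Char) (m : Int) :
    cqA_loop l q m = q ++ cqCat (l.take ((cqB_totals l (q.length : Int)).countP (fun t => t < 300))) := by
  induction l generalizing q m with
  | nil => simp [cqA_loop, cqB_totals, cqCat]
  | cons k rest ih =>
    rw [cqA_loop, cqB_totals]
    have hlen : ((q ++ k.toList ++ [' ']).length : Int)
        = (q.length : Int) + PySem.Str.len k + 1 := by
      simp [PySem.Str.len]; ring
    by_cases h : (q ++ k.toList ++ [' ']).length ≥ 300
    · have h2 : ¬ ((q.length : Int) + PySem.Str.len k + 1 < 300) := by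
        rw [← hlen]; exact_mod_cast fun hlt => absurd h (by omega)
      rw [if_pos h]
      have hrest : (cqB_totals rest ((q.length : Int) + PySem.Str.len k + 1)).countP
          (fun t => t < 300) = 0 := by
        rw [List.countP_eq_zero]
        intro x hx
        have := cqB_totals_gt rest ((q.length : Int) + PySem.Str.len k + 1) x hx
        have h3 : (300:Int) ≤ (q.length : Int) + PySem.Str.len k + 1 := by omega
        simp only [decide_eq_true_eq]
        omega
      rw [List.countP_cons]
      simp only [h2, decide_false]
      rw [hrest]
      simp [cqCat]
    · have h2 : ((q.length : Int) + PySem.Str.len k + 1 < 300) := by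
        rw [← hlen]; exact_mod_cast by omega
      rw [if_neg h, ih _ (m + 1), hlen, List.countP_cons]
      simp only [h2, decide_true]
      simp [cqCat, List.take_succ_cons]
-- dropping cqCat's trailing space gives the space-join of the keywords (list side)
theorem cqCat_dropLast (l : List String) :
    (cqCat l).dropLast = PySem.Chars.join [' '] (l.map String.toList) := by
  induction l with
  | nil => simp [cqCat, PySem.Chars.join, List.intercalate]
  | cons k rest ih =>
    cases rest with
    | nil =>
      show ((k.toList ++ [' ']) ++ cqCat []).dropLast = _
      rw [show cqCat [] = [] from rfl, List.append_nil, List.dropLast_concat]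
      simp [PySem.Chars.join_singleton]
    | cons k2 r2 =>
      have hne : cqCat (k2 :: r2) ≠ [] := by simp [cqCat]
      have h1 : cqCat (k :: k2 :: r2) = (k.toList ++ [' ']) ++ cqCat (k2 :: r2) := by
        simp [cqCat]
      rw [h1, List.dropLast_append_of_ne_nil hne, ih]
      simp [PySem.Chars.join_cons_cons]

theorem cq_main (kws : List String) :
    String.ofList (PySem.Chars.slice (cqA_loop kws [] 0) none (some (-1)))
      = PySem.Str.join " " (PySem.List.slice kws none
          (some (((cqB_totals kws 0).countP (fun t => t < 300) : Nat) : Int))) := by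
  rw [cqA_loop_eq kws [] 0]
  simp only [List.nil_append, List.length_nil, Nat.cast_zero]
  rw [PySem.Chars.slice_eq_listSlice, PySem.List.slice_to_neg_one, cqCat_dropLast,
      PySem.List.slice_to _ (by positivity)]
  rw [Int.toNat_natCast]
  have h2 : PySem.Chars.join [' ']
      ((kws.take ((cqB_totals kws 0).countP (fun t => t < 300))).map String.toList)
      = (PySem.Str.join " " (kws.take ((cqB_totals kws 0).countP (fun t => t < 300)))).toList := by
    simp [PySem.Str.toList_join]
  rw [h2, String.ofList_toList]

-- ===== VERDICT (by name: the statement is the Claim_ definition above) =====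
theorem construct_query_spec : Claim_equal_construct_query := by
  intro keywords num_keywords _
  unfold Spec_construct_query construct_query construct_query_alt
  dsimp only
  exact cq_main _
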